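-- pv_equiv track=rewrite | github.com/LeeKangHoo/Swea | diff_3/3499_퍼펙트셔플/3499_퍼펙트셔플.py | solve
-- ===== SOURCE A (Python) =====
-- def solve(cards):
--     mid = int((len(cards) / 2) + 0.5)
--     shuffle1 = cards[:mid]
--     shuffle2 = cards[mid:]
--     r = []
--
--     for i in range(mid):
--         r.append(shuffle1[i])
--         if len(shuffle2) > i:
--             r.append(shuffle2[i])
--     return ' '.join(r)
-- ===== SOURCE B (Python) =====
-- def solve(cards):
--     mid = (len(cards) + 1) // 2
--     r = [None] * len(cards)
--     r[0::2] = cards[:mid]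
--     r[1::2] = cards[mid:]
--     return ' '.join(r)
-- ===== Notes on version B (the rewrite author's own statement) =====
-- stated objective: idiomatic
-- what changed: Replaces the index loop with conditional append by strided slice assignment into a preallocated list (evens = first half, odds = second half), and the float-based mid with integer ceil division.
import Mathlib
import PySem

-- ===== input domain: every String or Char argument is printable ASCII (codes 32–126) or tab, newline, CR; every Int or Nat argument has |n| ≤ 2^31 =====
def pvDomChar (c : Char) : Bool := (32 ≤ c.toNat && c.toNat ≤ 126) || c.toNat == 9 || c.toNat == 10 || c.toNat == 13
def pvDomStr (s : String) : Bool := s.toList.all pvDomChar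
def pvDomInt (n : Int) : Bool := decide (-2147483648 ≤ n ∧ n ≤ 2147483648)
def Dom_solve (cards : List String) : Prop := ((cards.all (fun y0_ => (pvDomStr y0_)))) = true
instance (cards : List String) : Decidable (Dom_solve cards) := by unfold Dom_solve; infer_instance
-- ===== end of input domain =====

-- B replaces A's index loop (with its conditional append) by strided placement:
-- first half at even positions, second half at odd positions (idiomatic slice assignment).

-- ===== PORT A =====
def solve (cards : List String) : String :=
  -- int((len(cards) / 2) + 0.5) = ⌈n/2⌉ = (n+1)/2; the float arithmetic is exact for list lengths
  let mid : Nat := (cards.length + 1) / 2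
  let shuffle1 := PySem.List.slice cards none (some (mid : Int))
  let shuffle2 := PySem.List.slice cards (some (mid : Int)) none
  let r := (List.range mid).foldl (fun (r : List String) (i : Nat) =>
    let r := r ++ [PySem.List.pyGetD shuffle1 (i : Int) ""]
    if shuffle2.length > i then r ++ [PySem.List.pyGetD shuffle2 (i : Int) ""] else r) []
  PySem.Str.join " " r

-- ===== PORT B =====
def solve_alt (cards : List String) : String :=
  let n := cards.length
  let mid : Nat := (n + 1) / 2
  -- r[0::2] = cards[:mid]; r[1::2] = cards[mid:] — position i of r holds
  -- (cards[:mid])[i/2] when i is even, (cards[mid:])[i/2] when i is odd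
  let r := (List.range n).map (fun i =>
    if i % 2 = 0 then (cards.take mid).getD (i / 2) "" else (cards.drop mid).getD (i / 2) "")
  PySem.Str.join " " r

-- ===== PRECONDITION & SPEC =====
def Spec_solve (cards : List String) (out : String) : Prop := out = solve_alt cards
instance (cards : List String) (out : String) : Decidable (Spec_solve cards out) := by unfold Spec_solve; infer_instance

-- ===== CLAIM (what is proved, stated in full; the proofs are below) =====
def Claim_equal_solve : Prop := ∀ (cards : List String), Dom_solve cards → Spec_solve cards (solve cards)

-- ===== LEMMAS AND PROOFS =====

/-- The perfect-shuffle interleaving both programs produce. -/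
def il : List String → List String → List String
  | [], _ => []
  | x :: xs, ys => x :: il ys xs
termination_by a b => a.length + b.length
decreasing_by simp; omega

theorem flat_eq_il (a : List String) : ∀ (b : List String) (n : Nat), n = a.length →
    b.length ≤ a.length → a.length ≤ b.length + 1 →
    (List.range n).flatMap
      (fun i => [a.getD i ""] ++ if b.length > i then [b.getD i ""] else []) = il a b := by
  induction a with
  | nil => intro b n hn h1 h2; subst hn; simp [il]
  | cons x a' IH =>
    intro b n hn h1 h2
    subst hn
    cases b with
    | nil =>
      cases a' with
      | nil => simp [il]
      | cons z zs => simp at h1 h2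
    | cons y b' =>
      simp only [List.length_cons, List.range_succ_eq_map, List.flatMap_cons, List.flatMap_map]
      rw [show il (x :: a') (y :: b') = x :: y :: il a' b' from by simp [il]]
      rw [← IH b' a'.length rfl (by simpa using h1) (by simpa using h2)]
      rw [show (x : String) :: y :: List.flatMap
            (fun i => [a'.getD i ""] ++ if b'.length > i then [b'.getD i ""] else [])
            (List.range a'.length)
          = [x, y] ++ List.flatMap
            (fun i => [a'.getD i ""] ++ if b'.length > i then [b'.getD i ""] else [])
            (List.range a'.length) from rfl]
      congr 1
      apply List.flatMap_congr
      intro i _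
      simp [Nat.succ_eq_add_one]

theorem map_eq_il (a : List String) : ∀ (b : List String) (n : Nat), n = a.length + b.length →
    b.length ≤ a.length → a.length ≤ b.length + 1 →
    (List.range n).map
      (fun i => if i % 2 = 0 then a.getD (i / 2) "" else b.getD (i / 2) "") = il a b := by
  induction a with
  | nil =>
    intro b n hn h1 _
    have hb : b = [] := List.eq_nil_of_length_eq_zero (Nat.le_zero.mp (by simpa using h1))
    subst hb; subst hn; simp [il]
  | cons x a' IH =>
    intro b n hn h1 h2
    cases b with
    | nil =>
      cases a' with
      | nil => subst hn; simp [il]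
      | cons z zs => simp at h1 h2
    | cons y b' =>
      have hn' : n = (a'.length + b'.length) + 1 + 1 := by simp at hn; omega
      subst hn'
      rw [List.range_succ_eq_map, List.range_succ_eq_map, List.map_cons, List.map_map,
        List.map_cons, List.map_map]
      rw [show il (x :: a') (y :: b') = x :: y :: il a' b' from by simp [il]]
      rw [← IH b' (a'.length + b'.length) rfl (by simpa using h1) (by simpa using h2)]
      congr 1
      congr 1
      apply List.map_congr_left
      intro i _
      have hm : (i + 1 + 1) % 2 = i % 2 := by omega
      have hd : (i + 1 + 1) / 2 = i / 2 + 1 := by omega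
      simp [Function.comp, Nat.succ_eq_add_one, hm, hd]

theorem solve_eq_il (cards : List String) :
    solve cards = PySem.Str.join " " (il (cards.take ((cards.length + 1) / 2))
      (cards.drop ((cards.length + 1) / 2))) := by
  simp only [solve]
  rw [PySem.List.slice_to_natCast, PySem.List.slice_from_natCast]
  have hms : (cards.length + 1) / 2 ≤ cards.length := by omega
  have hbody : (fun (r : List String) (i : Nat) =>
      let r := r ++ [PySem.List.pyGetD (cards.take ((cards.length + 1) / 2)) (i : Int) ""]
      if (cards.drop ((cards.length + 1) / 2)).length > i then
        r ++ [PySem.List.pyGetD (cards.drop ((cards.length + 1) / 2)) (i : Int) ""] else r)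
      = (fun (r : List String) (i : Nat) => r ++
        ([(cards.take ((cards.length + 1) / 2)).getD i ""] ++
          if (cards.drop ((cards.length + 1) / 2)).length > i then
            [(cards.drop ((cards.length + 1) / 2)).getD i ""] else [])) := by
    funext r i
    simp only [PySem.List.pyGetD_natCast]
    by_cases h : i < cards.length - (cards.length + 1) / 2 <;> simp [h, List.length_drop]
  rw [hbody, PySem.List.foldl_append_eq_flatMap, List.nil_append]
  rw [flat_eq_il]
  · simp; omega
  · simp; omega
  · simp; omega

theorem solve_alt_eq_il (cards : List String) :
    solve_alt cards = PySem.Str.join " " (il (cards.take ((cards.length + 1) / 2))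
      (cards.drop ((cards.length + 1) / 2))) := by
  simp only [solve_alt]
  have hms : (cards.length + 1) / 2 ≤ cards.length := by omega
  rw [map_eq_il]
  · simp; omega
  · simp; omega
  · simp; omega

-- ===== VERDICT (by name: the statement is the Claim_ definition above) =====
theorem solve_spec : Claim_equal_solve := by
  intro cards _
  unfold Spec_solve
  rw [solve_eq_il, solve_alt_eq_il]
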